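-- pv_equiv track=rewrite | github.com/taylorott/Advent_of_Code | src/Helpers/basic_helpers.py | grid_diagonals_down_right
-- ===== SOURCE A (Python) =====
-- def grid_diagonals_down_right(mat_in):
--     h = len(mat_in)
--     w = len(mat_in[0])
--
--     grid_out = []
--
--     for i in range(w-1,0,-1):
--         temp = []
--         y = 0
--         x = i
--
--         while x<w and y<h:
--             temp.append(mat_in[y][x])
--             x+=1
--             y+=1
--
--         grid_out.append(temp)
--
--     for j in range(0,h):
--         temp = []
--         y = j
--         x = 0
--
--         while x<w and y<h:
--             temp.append(mat_in[y][x])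
--             x+=1
--             y+=1
--
--         grid_out.append(temp)
--
--     return grid_out
-- ===== SOURCE B (Python) =====
-- def grid_diagonals_down_right(mat_in):
--     h = len(mat_in)
--     w = len(mat_in[0])
--     pairs = [(x - y, mat_in[y][x]) for y in range(h) for x in range(w)]
--     buckets = {}
--     for k, v in pairs:
--         buckets.setdefault(k, []).append(v)
--     keys = list(range(w - 1, 0, -1)) + list(range(0, -h, -1))
--     return [buckets.get(k, []) for k in keys]
-- ===== Notes on version B (the rewrite author's own statement) =====
-- stated objective: alternative
-- what changed: Replaces A's per-diagonal two-coordinate while-walks with a single row-major pass that groups every cell into a bucket keyed by x-y, then reads the buckets out in A's key order.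
import Mathlib
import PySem

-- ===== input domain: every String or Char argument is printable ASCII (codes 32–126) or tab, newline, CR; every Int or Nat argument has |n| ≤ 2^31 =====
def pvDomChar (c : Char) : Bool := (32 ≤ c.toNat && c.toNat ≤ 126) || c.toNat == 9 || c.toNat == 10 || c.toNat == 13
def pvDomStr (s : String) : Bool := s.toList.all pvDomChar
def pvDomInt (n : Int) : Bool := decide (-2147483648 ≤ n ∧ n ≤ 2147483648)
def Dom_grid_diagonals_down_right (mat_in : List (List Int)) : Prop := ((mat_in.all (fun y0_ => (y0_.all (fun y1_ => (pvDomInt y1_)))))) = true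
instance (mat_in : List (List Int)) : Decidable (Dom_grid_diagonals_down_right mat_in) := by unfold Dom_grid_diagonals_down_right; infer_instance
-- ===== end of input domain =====

-- B groups all cells into buckets keyed by x-y in one row-major pass instead of A's per-diagonal walks (alternative decomposition, same cost).
-- Pre_ excludes exactly the inputs on which Python A raises IndexError: the empty grid and grids whose first row is longer than some row.


-- ===== PORT A =====
-- the inner 'while x<w and y<h: temp.append(mat_in[y][x]); x+=1; y+=1' loop
def pvDiagWalk (mat : List (List Int)) (w h : Int) (y x : Int) : List Int :=
  if hc : x < w ∧ y < h then
    PySem.List.pyGetD (PySem.List.pyGetD mat y []) x 0 :: pvDiagWalk mat w h (y + 1) (x + 1)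
  else []
termination_by (w - x).toNat
decreasing_by omega

def grid_diagonals_down_right (mat_in : List (List Int)) : List (List Int) :=
  let h : Int := PySem.List.len mat_in
  let w : Int := PySem.List.len (PySem.List.pyGetD mat_in 0 [])
  ((PySem.List.pyRange (w - 1) 0 (-1)).map (fun i => pvDiagWalk mat_in w h 0 i))
    ++ ((PySem.List.pyRange 0 h 1).map (fun j => pvDiagWalk mat_in w h j 0))

-- ===== PORT B =====
-- pairs = [(x - y, mat_in[y][x]) for y in range(h) for x in range(w)]
def pvPairs (mat : List (List Int)) (h w : Int) : List (Int × Int) :=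
  (PySem.List.pyRange 0 h 1).flatMap (fun y =>
    (PySem.List.pyRange 0 w 1).map (fun x =>
      (x - y, PySem.List.pyGetD (PySem.List.pyGetD mat y []) x 0)))

def grid_diagonals_down_right_alt (mat_in : List (List Int)) : List (List Int) :=
  let h : Int := PySem.List.len mat_in
  let w : Int := PySem.List.len (PySem.List.pyGetD mat_in 0 [])
  let buckets := (pvPairs mat_in h w).foldl
      (fun d p => d.modify p.1 [] (· ++ [p.2])) PySem.Dict.empty
  let keys := PySem.List.pyRange (w - 1) 0 (-1) ++ PySem.List.pyRange 0 (-h) (-1)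
  keys.map (fun k => buckets.getD k [])

-- ===== PRECONDITION & SPEC =====
-- exactly where Python A returns: nonempty grid, no row shorter than row 0 (else mat_in[0] / mat_in[y][x] raises IndexError)
def Pre_grid_diagonals_down_right (mat_in : List (List Int)) : Prop :=
  mat_in ≠ [] ∧ ∀ row ∈ mat_in, mat_in.headI.length ≤ row.length
instance (mat_in : List (List Int)) : Decidable (Pre_grid_diagonals_down_right mat_in) := by
  unfold Pre_grid_diagonals_down_right; infer_instance
def pvWitness_grid_diagonals_down_right : List (List Int) := [[1, 2, 3], [4, 5, 6]]

def Spec_grid_diagonals_down_right (mat_in : List (List Int)) (out : List (List Int)) : Prop := out = grid_diagonals_down_right_alt mat_in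
instance (mat_in : List (List Int)) (out : List (List Int)) : Decidable (Spec_grid_diagonals_down_right mat_in out) := by unfold Spec_grid_diagonals_down_right; infer_instance

-- ===== CLAIM (what is proved, stated in full; the proofs are below) =====
def Claim_equal_grid_diagonals_down_right : Prop := ∀ (mat_in : List (List Int)), Dom_grid_diagonals_down_right mat_in → Pre_grid_diagonals_down_right mat_in → Spec_grid_diagonals_down_right mat_in (grid_diagonals_down_right mat_in)

-- ===== LEMMAS AND PROOFS =====

-- the elements of the diagonal with key k, selected row by row from the given list of row indices
def pvDsel (mat : List (List Int)) (w k : Int) (ys : List Int) : List Int :=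
  ys.flatMap (fun y =>
    if 0 ≤ y + k ∧ y + k < w then [PySem.List.pyGetD (PySem.List.pyGetD mat y []) (y + k) 0] else [])

lemma pvDsel_eq_nil (mat : List (List Int)) (w k : Int) (ys : List Int)
    (hy : ∀ y ∈ ys, ¬ (0 ≤ y + k ∧ y + k < w)) : pvDsel mat w k ys = [] := by
  unfold pvDsel
  rw [List.flatMap_eq_nil_iff]
  intro y hyy
  rw [if_neg (hy y hyy)]

lemma pvFilter_pyRange_eq_single (t : Int) : ∀ (n : Nat) (a b : Int), (b - a).toNat = n →
    (PySem.List.pyRange a b 1).filter (fun x => x == t) = if a ≤ t ∧ t < b then [t] else [] := by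
  intro n
  induction n with
  | zero =>
    intro a b hn
    rw [PySem.List.pyRange_one_eq_nil (by omega)]
    have : ¬ (a ≤ t ∧ t < b) := by omega
    simp [this]
  | succ n ih =>
    intro a b hn
    have hab : a < b := by omega
    rw [PySem.List.pyRange_one_cons hab, List.filter_cons, ih (a + 1) b (by omega)]
    by_cases hat : a = t
    · subst hat
      have h1 : ¬ (a + 1 ≤ a ∧ a < b) := by omega
      simp [hab]
    · have hf : (a == t) = false := by simp [hat]
      rw [hf]
      simp only [Bool.false_eq_true, if_false]
      by_cases h2 : a + 1 ≤ t ∧ t < b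
      · rw [if_pos h2, if_pos (by omega)]
      · rw [if_neg h2, if_neg (by omega)]

-- B's bucket for key k holds exactly the diagonal-k cells, in row order
lemma pvBucket_eq_dsel (mat : List (List Int)) (h w k : Int) :
    ((pvPairs mat h w).foldl (fun d p => d.modify p.1 [] (· ++ [p.2])) PySem.Dict.empty).getD k []
      = pvDsel mat w k (PySem.List.pyRange 0 h 1) := by
  rw [PySem.Dict.getD_foldl_modify_append]
  simp only [PySem.Dict.getD_empty, List.nil_append]
  unfold pvPairs pvDsel
  rw [List.filter_flatMap, List.map_flatMap]
  apply List.flatMap_congr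
  intro y _
  rw [List.filter_map]
  have hpred : ((fun p : Int × Int => p.1 == k) ∘ (fun x => (x - y, PySem.List.pyGetD (PySem.List.pyGetD mat y []) x 0))) = (fun x => x == y + k) := by
    funext x
    by_cases hx : x = y + k
    · simp [hx]
    · simp [hx]
      omega
  rw [hpred, pvFilter_pyRange_eq_single (y + k) (w - 0).toNat 0 w rfl]
  by_cases hc : 0 ≤ y + k ∧ y + k < w
  · rw [if_pos hc, if_pos (by omega)]
    simp
  · rw [if_neg hc, if_neg (by omega)]
    simp

-- A's while-walk starting at (y, y + k) equals the diagonal-k cells of the remaining rows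
lemma pvWalk_eq_dsel (mat : List (List Int)) (w h k : Int) :
    ∀ (n : Nat) (y : Int), (h - y).toNat = n → 0 ≤ y + k →
      pvDiagWalk mat w h y (y + k) = pvDsel mat w k (PySem.List.pyRange y h 1) := by
  intro n
  induction n with
  | zero =>
    intro y hn _
    rw [PySem.List.pyRange_one_eq_nil (by omega), pvDiagWalk]
    rw [dif_neg (by omega)]
    simp [pvDsel]
  | succ n ih =>
    intro y hn hk
    have hyh : y < h := by omega
    rw [PySem.List.pyRange_one_cons hyh]
    unfold pvDsel
    rw [List.flatMap_cons]
    rw [pvDiagWalk]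
    by_cases hw : y + k < w
    · rw [dif_pos ⟨hw, hyh⟩, if_pos ⟨hk, hw⟩]
      have := ih (y + 1) (by omega) (by omega)
      rw [show y + k + 1 = (y + 1) + k by ring] at *
      rw [this]
      rfl
    · rw [dif_neg (by omega), if_neg (by omega)]
      have h0 : pvDsel mat w k (PySem.List.pyRange (y + 1) h 1) = [] := by
        apply pvDsel_eq_nil
        intro y' hy'
        rw [PySem.List.mem_pyRange_one] at hy'
        omega
      unfold pvDsel at h0
      rw [h0]
      rfl

-- ===== VERDICT (by name: the statement is the Claim_ definition above) =====
theorem grid_diagonals_down_right_spec : Claim_equal_grid_diagonals_down_right := by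
  intro mat _ _
  show grid_diagonals_down_right mat = grid_diagonals_down_right_alt mat
  unfold grid_diagonals_down_right grid_diagonals_down_right_alt
  dsimp only
  set h : Int := PySem.List.len mat with hh
  set w : Int := PySem.List.len (PySem.List.pyGetD mat 0 []) with hww
  have hh0 : 0 ≤ h := by simp [hh]
  have hw0 : 0 ≤ w := by simp [hww]
  rw [List.map_append]
  congr 1
  · apply List.map_congr_left
    intro i hi
    rw [PySem.List.mem_pyRange_neg_one] at hi
    rw [pvBucket_eq_dsel]
    have := pvWalk_eq_dsel mat w h i (h - 0).toNat 0 rfl (by omega)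
    rw [show (0 : Int) + i = i by ring] at this
    exact this
  · rw [PySem.List.pyRange_neg_one, PySem.List.pyRange_one]
    rw [show (0 - -h).toNat = (h - 0).toNat by omega]
    rw [List.map_map, List.map_map]
    apply List.map_congr_left
    intro t ht
    rw [List.mem_range] at ht
    simp only [Function.comp]
    rw [pvBucket_eq_dsel]
    have hsplit : PySem.List.pyRange 0 h 1
        = PySem.List.pyRange 0 (t : Int) 1 ++ PySem.List.pyRange (t : Int) h 1 :=
      PySem.List.pyRange_one_append 0 (t : Int) h (by omega) (by omega)
    rw [hsplit]
    unfold pvDsel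
    rw [List.flatMap_append]
    have h1 : pvDsel mat w (0 - (t : Int)) (PySem.List.pyRange 0 (t : Int) 1) = [] := by
      apply pvDsel_eq_nil
      intro y' hy'
      rw [PySem.List.mem_pyRange_one] at hy'
      omega
    unfold pvDsel at h1
    rw [h1, List.nil_append]
    have := pvWalk_eq_dsel mat w h (0 - (t : Int)) (h - t).toNat (t : Int) rfl (by omega)
    rw [show (t : Int) + (0 - (t : Int)) = 0 by ring] at this
    rw [show (0 : Int) + (t : Int) = (t : Int) by ring]
    exact this
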